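-- pv_equiv track=rewrite | github.com/fu351/SecretSauce | backend/scripts/analysis/populate-substitution-proposals.py | components_of
-- ===== SOURCE A (Python) =====
-- def components_of(nodes: frozenset[str], edge_set: set[tuple[str, str]]) -> list[frozenset[str]]:
--     """Connected components of an arbitrary node subset using edge_set."""
--     visited: set[str] = set()
--     result: list[frozenset[str]] = []
--
--     def dfs(node: str, component: set[str]) -> None:
--         component.add(node)
--         visited.add(node)
--         for other in nodes:
--             if other not in visited and (min(node, other), max(node, other)) in edge_set:
--                 dfs(other, component)
--
--     for node in nodes:
--         if node not in visited:
--             component: set[str] = set()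
--             dfs(node, component)
--             result.append(frozenset(component))
--
--     return result
-- ===== SOURCE B (Python) =====
-- def components_of(nodes, edge_set):
--     """Connected components of an arbitrary node subset using edge_set.
--
--     Builds adjacency lists once from edge_set (restricted to nodes, in
--     nodes order) and runs an iterative stack DFS: O(V + E) instead of
--     rescanning all nodes at every DFS step.
--     """
--     order = list(nodes)
--     node_set = set(order)
--     # neighbour sets, from the edges only
--     nb = {}
--     for u, v in edge_set:
--         if u < v and u in node_set and v in node_set:
--             nb.setdefault(u, set()).add(v)
--             nb.setdefault(v, set()).add(u)
--     # adjacency lists in nodes order: one pass over nodes, bucket the edges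
--     adj = {u: [] for u in order}
--     for w in order:
--         for x in nb.get(w, ()):
--             adj[x].append(w)
--     visited = set()
--     result = []
--     for root in order:
--         if root in visited:
--             continue
--         comp = []
--         stack = [root]
--         while stack:
--             x = stack.pop()
--             if x in visited:
--                 continue
--             visited.add(x)
--             comp.append(x)
--             stack.extend(reversed(adj[x]))
--         result.append(frozenset(comp))
--     return result
-- ===== Notes on version B (the rewrite author's own statement) =====
-- stated objective: faster
-- what changed: A rescans the whole node list at every DFS step to find neighbours (quadratic even on sparse graphs) and uses recursion; B builds adjacency lists once from edge_set (bucketed into nodes order) and runs an iterative stack DFS over real neighbours, visiting each node and edge a constant number of times.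
import Mathlib
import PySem

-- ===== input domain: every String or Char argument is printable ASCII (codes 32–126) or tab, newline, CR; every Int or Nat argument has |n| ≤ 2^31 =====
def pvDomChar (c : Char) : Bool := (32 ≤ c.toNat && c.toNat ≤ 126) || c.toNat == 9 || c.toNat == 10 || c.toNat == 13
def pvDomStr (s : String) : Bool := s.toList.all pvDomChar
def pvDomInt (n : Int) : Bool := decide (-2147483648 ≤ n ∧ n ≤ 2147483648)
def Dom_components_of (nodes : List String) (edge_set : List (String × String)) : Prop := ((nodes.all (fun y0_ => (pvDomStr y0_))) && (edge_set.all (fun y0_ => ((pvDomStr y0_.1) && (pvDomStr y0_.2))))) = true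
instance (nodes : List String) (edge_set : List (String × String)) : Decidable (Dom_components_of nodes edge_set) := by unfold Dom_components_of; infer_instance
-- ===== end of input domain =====

-- B replaces A's per-step rescan of all nodes by adjacency lists built once from edge_set
-- plus an iterative stack DFS (different algorithm; faster on large inputs).
-- ===== PORT A =====
-- Python's (min(a, b), max(a, b)) on strings (code-point lexicographic = Lean's < on toList)
def pvPairA (a b : String) : String × String :=
  if b.toList < a.toList then (b, a) else (a, b)

-- '(min(node, other), max(node, other)) in edge_set'
def pvEdgeA (edge_set : List (String × String)) (a b : String) : Bool :=
  edge_set.contains (pvPairA a b)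

mutual
-- 'def dfs(node, component)' — state (component, visited); fuel is a recursion-depth guard
-- only (every call visits a new node, so fuel = |nodes| + 1 is never exhausted)
def pvDfsA (nodes : List String) (edge_set : List (String × String)) :
    Nat → String → List String → PySem.Set String → List String × PySem.Set String
  | 0, node, component, visited =>
      (PySem.Set.add component node, PySem.Set.add visited node)
  | fuel+1, node, component, visited =>
      pvDfsLoopA nodes edge_set fuel node (PySem.Set.add component node) (PySem.Set.add visited node) nodes
  termination_by fuel _ _ _ => (fuel, nodes.length + 2)

-- 'for other in nodes: if other not in visited and (min, max) in edge_set: dfs(other, component)'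
def pvDfsLoopA (nodes : List String) (edge_set : List (String × String)) :
    Nat → String → List String → PySem.Set String → List String → List String × PySem.Set String
  | _, _, component, visited, [] => (component, visited)
  | fuel, node, component, visited, other :: rest =>
      if ¬ PySem.Set.contains visited other ∧ pvEdgeA edge_set node other then
        let p := pvDfsA nodes edge_set fuel other component visited
        pvDfsLoopA nodes edge_set fuel node p.1 p.2 rest
      else
        pvDfsLoopA nodes edge_set fuel node component visited rest
  termination_by fuel _ _ _ l => (fuel + 1, l.length)
end

def components_of (nodes : List String) (edge_set : List (String × String)) : List (List String) :=
  let fuel := nodes.length + 1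
  (nodes.foldl
    (fun (st : PySem.Set String × List (List String)) node =>
      if ¬ PySem.Set.contains st.1 node then
        let p := pvDfsA nodes edge_set fuel node [] st.1
        (p.2, st.2 ++ [p.1])
      else st)
    (PySem.Set.empty, [])).2

-- ===== PORT B =====
-- Source B: nb — neighbour sets from the edges, restricted to nodes
def pvNbB (nodes : List String) (edge_set : List (String × String)) :
    PySem.Dict String (PySem.Set String) :=
  let nodeSet := PySem.Set.ofList nodes
  edge_set.foldl
    (fun d e =>
      if e.1.toList < e.2.toList ∧ PySem.Set.contains nodeSet e.1 ∧ PySem.Set.contains nodeSet e.2 then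
        let d1 := d.insert e.1 (PySem.Set.add (d.getD e.1 PySem.Set.empty) e.2)
        d1.insert e.2 (PySem.Set.add (d1.getD e.2 PySem.Set.empty) e.1)
      else d)
    PySem.Dict.empty

-- Source B: adj — adjacency lists in nodes order, bucketed in one pass over nodes
def pvAdjB (nodes : List String) (edge_set : List (String × String)) :
    PySem.Dict String (List String) :=
  let nb := pvNbB nodes edge_set
  let init := nodes.foldl (fun d u => d.insert u ([] : List String)) PySem.Dict.empty
  nodes.foldl
    (fun d w => (nb.getD w PySem.Set.empty).foldl (fun d2 x => d2.insert x (d2.getD x [] ++ [w])) d)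
    init

-- general facts cited by the termination proofs of pvVisitB (and pvRefVisit below)
lemma pv_filter_subpred {α : Type} (l : List α) (p q : α → Bool)
    (h : ∀ a, q a = true → p a = true) : l.filter q = (l.filter p).filter q := by
  induction l with
  | nil => rfl
  | cons y ys ih =>
    by_cases hq : q y = true
    · simp only [List.filter_cons, hq, h y hq, if_true, ih]
    · simp only [Bool.not_eq_true] at hq
      by_cases hp : p y = true
      · simp only [List.filter_cons, hq, hp, if_true, Bool.false_eq_true, if_false, ih]
      · simp only [Bool.not_eq_true] at hp
        simp only [List.filter_cons, hq, hp, Bool.false_eq_true, if_false, ih]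

lemma pv_filter_length_mono {α : Type} (l : List α) (p q : α → Bool)
    (h : ∀ a, q a = true → p a = true) : (l.filter q).length ≤ (l.filter p).length := by
  rw [pv_filter_subpred l p q h]; exact List.length_filter_le _ _

lemma pv_filter_length_strict {α : Type} (l : List α) (p q : α → Bool)
    (h : ∀ a, q a = true → p a = true) (x : α) (hx : x ∈ l) (hpx : p x = true) (hqx : q x = false) :
    (l.filter q).length < (l.filter p).length := by
  rw [pv_filter_subpred l p q h]
  exact List.length_filter_lt_length_iff_exists.mpr
    ⟨x, List.mem_filter.mpr ⟨hx, hpx⟩, by simp [hqx]⟩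

lemma pv_mem_of_contains {v : PySem.Set String} {u : String}
    (h : PySem.Set.contains v u = true) : u ∈ v := by
  rwa [PySem.Set.contains_iff] at h

lemma pv_contains_add (v : PySem.Set String) (x w : String) :
    PySem.Set.contains (PySem.Set.add v x) w = (PySem.Set.contains v w || w == x) := by
  rcases h : PySem.Set.contains (PySem.Set.add v x) w with _ | _
  · rcases h1 : PySem.Set.contains v w with _ | _
    · rcases h2 : (w == x) with _ | _
      · rfl
      · exfalso
        have hm : w ∈ PySem.Set.add v x := (PySem.Set.mem_add _ _ _).mpr (Or.inr (beq_iff_eq.mp h2))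
        rw [← PySem.Set.contains_iff, h] at hm
        exact Bool.noConfusion hm
    · exfalso
      have hm : w ∈ PySem.Set.add v x := (PySem.Set.mem_add _ _ _).mpr (Or.inl (pv_mem_of_contains h1))
      rw [← PySem.Set.contains_iff, h] at hm
      exact Bool.noConfusion hm
  · rcases (PySem.Set.mem_add _ _ _).mp (pv_mem_of_contains h) with h1 | h1
    · rw [← PySem.Set.contains_iff] at h1
      rw [h1, Bool.true_or]
    · have hbe : (w == x) = true := beq_iff_eq.mpr h1
      rw [hbe, Bool.or_true]

lemma pv_eq_false {b : Bool} (h : ¬ b = true) : b = false := by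
  rcases hh : b with _ | _
  · rfl
  · exact absurd hh h

lemma pv_sub_add (v : PySem.Set String) (x : String) :
    ∀ a, (!PySem.Set.contains (PySem.Set.add v x) a) = true → (!PySem.Set.contains v a) = true := by
  intro a ha
  rw [Bool.not_eq_true'] at ha ⊢
  rw [pv_contains_add] at ha
  exact (Bool.or_eq_false_iff.mp ha).1

-- Source B: the 'while stack' loop — state (comp, visited); the stack is modelled top-first,
-- so Python's stack.extend(reversed(adj[x])) / stack.pop() is 'adj[x] ++ rest'
def pvVisitB (adj : PySem.Dict String (List String)) :
    List String → PySem.Set String → List String → List String × PySem.Set String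
  | comp, visited, [] => (comp, visited)
  | comp, visited, x :: rest =>
      if PySem.Set.contains visited x then
        pvVisitB adj comp visited rest
      else
        pvVisitB adj (comp ++ [x]) (PySem.Set.add visited x) (adj.getD x [] ++ rest)
  termination_by _ visited s =>
    ((adj.keys.filter (fun w => !PySem.Set.contains visited w)).length, s.length)
  decreasing_by
  · apply Prod.Lex.right; simp
  · have hvf : PySem.Set.contains visited x = false :=
      pv_eq_false ‹¬ PySem.Set.contains visited x = true›
    by_cases hk : adj.contains x = true
    · apply Prod.Lex.left
      exact pv_filter_length_strict adj.keys _ _ (pv_sub_add visited x) x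
        (by rwa [PySem.Dict.contains_iff_mem_keys] at hk)
        (by show (!PySem.Set.contains visited x) = true; rw [hvf]; rfl)
        (by show (!PySem.Set.contains (PySem.Set.add visited x) x) = false
            rw [pv_contains_add]; simp)
    · have hnil : adj.getD x [] = [] := by
        apply PySem.Dict.getD_of_not_contains
        exact pv_eq_false hk
      rw [hnil]
      rcases Nat.lt_or_ge ((adj.keys.filter (fun w => !PySem.Set.contains (PySem.Set.add visited x) w)).length) ((adj.keys.filter (fun w => !PySem.Set.contains visited w)).length) with h | h
      · exact Prod.Lex.left _ _ h
      · rw [Nat.le_antisymm (pv_filter_length_mono adj.keys _ _ (pv_sub_add visited x)) h]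
        exact Prod.Lex.right _ (by simp)

def components_of_alt (nodes : List String) (edge_set : List (String × String)) : List (List String) :=
  let adj := pvAdjB nodes edge_set
  (nodes.foldl
    (fun (st : PySem.Set String × List (List String)) root =>
      if PySem.Set.contains st.1 root then st
      else
        let p := pvVisitB adj [] st.1 [root]
        (p.2, st.2 ++ [p.1]))
    (PySem.Set.empty, [])).2

-- ===== PRECONDITION & SPEC =====
def Spec_components_of (nodes : List String) (edge_set : List (String × String)) (out : List (List String)) : Prop := out = components_of_alt nodes edge_set
instance (nodes : List String) (edge_set : List (String × String)) (out : List (List String)) : Decidable (Spec_components_of nodes edge_set out) := by unfold Spec_components_of; infer_instance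

-- ===== CLAIM (what is proved, stated in full; the proofs are below) =====
def Claim_equal_components_of : Prop := ∀ (nodes : List String) (edge_set : List (String × String)), Dom_components_of nodes edge_set → Spec_components_of nodes edge_set (components_of nodes edge_set)

-- ===== LEMMAS AND PROOFS =====

-- A's neighbour scan, statically: the nodes that pass the edge test against u
def pvNeighA (nodes : List String) (edge_set : List (String × String)) (u : String) : List String :=
  nodes.filter (fun w => pvEdgeA edge_set u w)

-- reference stack DFS with A's neighbour lists (proof intermediary between the two ports);
-- the 'x ∉ nodes' drop branch exists only for termination and is never reached where it is used
def pvRefVisit (nodes : List String) (edge_set : List (String × String)) :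
    List String → PySem.Set String → List String → List String × PySem.Set String
  | comp, visited, [] => (comp, visited)
  | comp, visited, x :: rest =>
      if PySem.Set.contains visited x then
        pvRefVisit nodes edge_set comp visited rest
      else if x ∈ nodes then
        pvRefVisit nodes edge_set (comp ++ [x]) (PySem.Set.add visited x)
          (pvNeighA nodes edge_set x ++ rest)
      else
        pvRefVisit nodes edge_set comp visited rest
  termination_by _ visited s =>
    ((nodes.filter (fun w => !PySem.Set.contains visited w)).length, s.length)
  decreasing_by
  · apply Prod.Lex.right; simp
  · apply Prod.Lex.left
    have hvf : PySem.Set.contains visited x = false :=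
      pv_eq_false ‹¬ PySem.Set.contains visited x = true›
    exact pv_filter_length_strict nodes _ _ (pv_sub_add visited x) x ‹x ∈ nodes›
      (by show (!PySem.Set.contains visited x) = true; rw [hvf]; rfl)
      (by show (!PySem.Set.contains (PySem.Set.add visited x) x) = false
          rw [pv_contains_add]; simp)
  · apply Prod.Lex.right; simp

lemma pv_visitB_skip (adj : PySem.Dict String (List String)) (c : List String)
    (v : PySem.Set String) (s : List String) (h : ∀ y ∈ s, PySem.Set.contains v y = true) :
    pvVisitB adj c v s = (c, v) := by
  induction s with
  | nil => rw [pvVisitB]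
  | cons x rest ih =>
    rw [pvVisitB, if_pos (h x (by simp))]
    exact ih (fun y hy => h y (by simp [hy]))

lemma pv_ref_skip (nodes : List String) (edge_set : List (String × String)) (c : List String)
    (v : PySem.Set String) (s : List String) (h : ∀ y ∈ s, PySem.Set.contains v y = true) :
    pvRefVisit nodes edge_set c v s = (c, v) := by
  induction s with
  | nil => rw [pvRefVisit]
  | cons x rest ih =>
    rw [pvRefVisit, if_pos (h x (by simp))]
    exact ih (fun y hy => h y (by simp [hy]))

lemma pv_ref_append (nodes : List String) (edge_set : List (String × String)) (c : List String)
    (v : PySem.Set String) (s1 s2 : List String) :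
    pvRefVisit nodes edge_set c v (s1 ++ s2) =
      pvRefVisit nodes edge_set (pvRefVisit nodes edge_set c v s1).1
        (pvRefVisit nodes edge_set c v s1).2 s2 := by
  induction c, v, s1 using pvRefVisit.induct nodes edge_set with
  | case1 c v =>
    rw [List.nil_append, pv_ref_skip nodes edge_set c v [] (by simp)]
  | case2 c v x rest hvis ih =>
    rw [List.cons_append, pvRefVisit, if_pos hvis, ih]
    conv_rhs => rw [pvRefVisit, if_pos hvis]
  | case3 c v x rest hvis hmem ih =>
    rw [List.cons_append, pvRefVisit, if_neg hvis, if_pos hmem, ← List.append_assoc, ih]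
    conv_rhs => rw [pvRefVisit, if_neg hvis, if_pos hmem]
  | case4 c v x rest hvis hmem ih =>
    rw [List.cons_append, pvRefVisit, if_neg hvis, if_neg hmem, ih]
    conv_rhs => rw [pvRefVisit, if_neg hvis, if_neg hmem]

lemma pv_ref_mono (nodes : List String) (edge_set : List (String × String)) (c : List String)
    (v : PySem.Set String) (s : List String) (y : String) :
    PySem.Set.contains v y = true →
    PySem.Set.contains (pvRefVisit nodes edge_set c v s).2 y = true := by
  induction c, v, s using pvRefVisit.induct nodes edge_set with
  | case1 c v => intro h; rw [pvRefVisit]; exact h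
  | case2 c v x rest hvis ih => intro h; rw [pvRefVisit, if_pos hvis]; exact ih h
  | case3 c v x rest hvis hmem ih =>
    intro h
    rw [pvRefVisit, if_neg hvis, if_pos hmem]
    exact ih (by rw [pv_contains_add, h, Bool.true_or])
  | case4 c v x rest hvis hmem ih => intro h; rw [pvRefVisit, if_neg hvis, if_neg hmem]; exact ih h

lemma pv_ref_inv (nodes : List String) (edge_set : List (String × String)) (c : List String)
    (v : PySem.Set String) (s : List String) :
    (∀ y ∈ c, PySem.Set.contains v y = true) →
    ∀ y ∈ (pvRefVisit nodes edge_set c v s).1,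
      PySem.Set.contains (pvRefVisit nodes edge_set c v s).2 y = true := by
  induction c, v, s using pvRefVisit.induct nodes edge_set with
  | case1 c v => intro h; rw [pvRefVisit]; exact h
  | case2 c v x rest hvis ih => intro h; rw [pvRefVisit, if_pos hvis]; exact ih h
  | case3 c v x rest hvis hmem ih =>
    intro h
    rw [pvRefVisit, if_neg hvis, if_pos hmem]
    apply ih
    intro y hy
    rw [pv_contains_add]
    rcases List.mem_append.mp hy with hy | hy
    · rw [h y hy, Bool.true_or]
    · have hbe : (y == x) = true := beq_iff_eq.mpr (List.mem_singleton.mp hy)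
      rw [hbe, Bool.or_true]
  | case4 c v x rest hvis hmem ih => intro h; rw [pvRefVisit, if_neg hvis, if_neg hmem]; exact ih h

-- ——— A's recursive dfs equals the reference stack DFS ———

lemma pv_dfs_ref (nodes : List String) (edge_set : List (String × String)) :
    ∀ (fuel : Nat) (u : String) (c : List String) (v : PySem.Set String),
      u ∈ nodes → PySem.Set.contains v u = false →
      (nodes.filter (fun w => !PySem.Set.contains v w)).length ≤ fuel →
      (∀ y ∈ c, PySem.Set.contains v y = true) →
      pvDfsA nodes edge_set fuel u c v = pvRefVisit nodes edge_set c v [u] := by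
  intro fuel
  induction fuel with
  | zero =>
    intro u c v hu hv hF _
    exfalso
    have hmem : u ∈ nodes.filter (fun w => !PySem.Set.contains v w) :=
      List.mem_filter.mpr ⟨hu, by rw [hv]; rfl⟩
    have := List.length_pos_of_mem hmem
    omega
  | succ fuel ih =>
    intro u c v hu hv hF hc
    have hloop : ∀ (l : List String) (c' : List String) (v' : PySem.Set String),
        (∀ w ∈ l, w ∈ nodes) →
        (nodes.filter (fun w => !PySem.Set.contains v' w)).length ≤ fuel →
        (∀ y ∈ c', PySem.Set.contains v' y = true) →
        pvDfsLoopA nodes edge_set fuel u c' v' l =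
          pvRefVisit nodes edge_set c' v' (l.filter (fun w => pvEdgeA edge_set u w)) := by
      intro l
      induction l with
      | nil => intro c' v' _ _ _; rw [pvDfsLoopA, List.filter_nil, pvRefVisit]
      | cons w rest ihl =>
        intro c' v' hl hF' hc'
        by_cases he : pvEdgeA edge_set u w = true
        · by_cases hw : PySem.Set.contains v' w = true
          · rw [pvDfsLoopA, if_neg (fun hC => hC.1 hw)]
            rw [List.filter_cons, if_pos (by rw [he]), pvRefVisit, if_pos hw]
            exact ihl c' v' (fun y hy => hl y (by simp [hy])) hF' hc'
          · have hw' : PySem.Set.contains v' w = false := pv_eq_false hw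
            rw [pvDfsLoopA, if_pos ⟨by rw [hw']; simp, he⟩]
            have hrec := ih w c' v' (hl w (by simp)) hw' hF' hc'
            rw [List.filter_cons, if_pos (by rw [he])]
            have hsplit := pv_ref_append nodes edge_set c' v' [w]
              (rest.filter (fun w => pvEdgeA edge_set u w))
            simp only [List.singleton_append] at hsplit
            rw [hsplit, ← hrec]
            have hstrict : ((nodes.filter (fun w2 => !PySem.Set.contains (PySem.Set.add v' w) w2)).length) < ((nodes.filter (fun w2 => !PySem.Set.contains v' w2)).length) := by
              exact pv_filter_length_strict nodes _ _ (pv_sub_add v' w) w (hl w (by simp))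
                (by show (!PySem.Set.contains v' w) = true; rw [hw']; rfl)
                (by show (!PySem.Set.contains (PySem.Set.add v' w) w) = false
                    rw [pv_contains_add]; simp)
            have hun : pvRefVisit nodes edge_set c' v' [w] =
                pvRefVisit nodes edge_set (c' ++ [w]) (PySem.Set.add v' w)
                  (pvNeighA nodes edge_set w ++ []) := by
              rw [pvRefVisit, if_neg (by rw [hw']; simp), if_pos (hl w (by simp))]
            have hmono : ∀ a, (!PySem.Set.contains (pvDfsA nodes edge_set fuel w c' v').2 a) = true →
                (!PySem.Set.contains (PySem.Set.add v' w) a) = true := by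
              intro a ha
              rw [Bool.not_eq_true'] at ha ⊢
              rcases hcc : PySem.Set.contains (PySem.Set.add v' w) a with _ | _
              · rfl
              · exfalso
                have hm2 := pv_ref_mono nodes edge_set (c' ++ [w]) (PySem.Set.add v' w)
                  (pvNeighA nodes edge_set w ++ []) a hcc
                rw [hrec, hun, hm2] at ha
                exact Bool.noConfusion ha
            apply ihl
            · intro y hy; exact hl y (by simp [hy])
            · have h1 := pv_filter_length_mono nodes _ _ hmono
              omega
            · rw [hrec]
              exact pv_ref_inv nodes edge_set c' v' [w] hc'
        · have he' : pvEdgeA edge_set u w = false := pv_eq_false he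
          rw [pvDfsLoopA, if_neg (fun hC => by rw [hC.2] at he'; exact Bool.noConfusion he'),
            List.filter_cons, if_neg (by rw [he']; simp)]
          exact ihl c' v' (fun y hy => hl y (by simp [hy])) hF' hc'
    have haddc : PySem.Set.add c u = c ++ [u] := by
      apply PySem.Set.add_of_not_mem
      intro hcu
      rw [hc u hcu] at hv
      exact Bool.noConfusion hv
    have hstrict : ((nodes.filter (fun w2 => !PySem.Set.contains (PySem.Set.add v u) w2)).length) < ((nodes.filter (fun w2 => !PySem.Set.contains v w2)).length) := by
      exact pv_filter_length_strict nodes _ _ (pv_sub_add v u) u hu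
        (by show (!PySem.Set.contains v u) = true; rw [hv]; rfl)
        (by show (!PySem.Set.contains (PySem.Set.add v u) u) = false
            rw [pv_contains_add]; simp)
    rw [pvDfsA, hloop nodes (PySem.Set.add c u) (PySem.Set.add v u) (fun w hw => hw)
      (by omega)
      (by
        intro y hy
        rw [haddc] at hy
        rw [pv_contains_add]
        rcases List.mem_append.mp hy with h1 | h1
        · rw [hc y h1, Bool.true_or]
        · have hbe : (y == u) = true := beq_iff_eq.mpr (List.mem_singleton.mp h1)
          rw [hbe, Bool.or_true])]
    rw [haddc]
    conv_rhs => rw [pvRefVisit, if_neg (by rw [hv]; simp), if_pos hu]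
    rw [pvNeighA, List.append_nil]
-- ——— characterisation of B's adjacency lists ———

lemma pv_lt_ne {a b : String} (h : a.toList < b.toList) : a ≠ b := by
  intro he; subst he; exact lt_irrefl _ h

lemma pv_pair_comm (a b : String) : pvPairA a b = pvPairA b a := by
  unfold pvPairA
  rcases lt_trichotomy a.toList b.toList with h | h | h
  · rw [if_neg (asymm h), if_pos h]
  · have : a = b := String.toList_inj.mp h
    subst this; rfl
  · rw [if_pos h, if_neg (asymm h)]

lemma pv_edge_comm (edge_set : List (String × String)) (a b : String) :
    pvEdgeA edge_set a b = pvEdgeA edge_set b a := by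
  unfold pvEdgeA; rw [pv_pair_comm]

lemma pv_mem_nodes {nodes : List String} {u : String}
    (h : PySem.Set.contains (PySem.Set.ofList nodes) u = true) : u ∈ nodes := by
  rw [PySem.Set.contains_iff, PySem.Set.mem_ofList] at h
  exact h

lemma pv_contains_nodes {nodes : List String} {u : String} (h : u ∈ nodes) :
    PySem.Set.contains (PySem.Set.ofList nodes) u = true := by
  rw [PySem.Set.contains_iff, PySem.Set.mem_ofList]
  exact h

-- the single edge-fold step of pvNbB, named so the proofs can speak about it
def pvNbStep (nodes : List String) (d : PySem.Dict String (PySem.Set String))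
    (e : String × String) : PySem.Dict String (PySem.Set String) :=
  if e.1.toList < e.2.toList ∧ PySem.Set.contains (PySem.Set.ofList nodes) e.1 ∧ PySem.Set.contains (PySem.Set.ofList nodes) e.2 then
    let d1 := d.insert e.1 (PySem.Set.add (d.getD e.1 PySem.Set.empty) e.2)
    d1.insert e.2 (PySem.Set.add (d1.getD e.2 PySem.Set.empty) e.1)
  else d

lemma pvNbB_eq (nodes : List String) (edge_set : List (String × String)) :
    pvNbB nodes edge_set = edge_set.foldl (pvNbStep nodes) PySem.Dict.empty := rfl

-- 'edge p, as recorded for key w, contains x'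
def pvCnd (nodes : List String) (p : String × String) (w x : String) : Prop :=
  p.1.toList < p.2.toList ∧ p.1 ∈ nodes ∧ p.2 ∈ nodes ∧
    ((p.1 = w ∧ p.2 = x) ∨ (p.1 = x ∧ p.2 = w))

lemma pv_nb_step_char (nodes : List String) (d : PySem.Dict String (PySem.Set String))
    (p : String × String) (w x : String) :
    PySem.Set.contains ((pvNbStep nodes d p).getD w PySem.Set.empty) x = true ↔
      (PySem.Set.contains (d.getD w PySem.Set.empty) x = true ∨ pvCnd nodes p w x) := by
  unfold pvNbStep
  by_cases hg : (p.1.toList < p.2.toList ∧ PySem.Set.contains (PySem.Set.ofList nodes) p.1 = true ∧ PySem.Set.contains (PySem.Set.ofList nodes) p.2 = true)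
  · rw [if_pos hg]
    obtain ⟨hlt, h1, h2⟩ := hg
    have hne12 : p.1 ≠ p.2 := pv_lt_ne hlt
    by_cases hw2 : w = p.2
    · subst hw2
      rw [PySem.Dict.getD_insert, if_pos rfl, PySem.Dict.getD_insert,
        if_neg (fun h => hne12 h.symm), pv_contains_add, Bool.or_eq_true, beq_iff_eq]
      constructor
      · rintro (h | h)
        · exact Or.inl h
        · exact Or.inr ⟨hlt, pv_mem_nodes h1, pv_mem_nodes h2, Or.inr ⟨h.symm, rfl⟩⟩
      · rintro (h | ⟨_, _, _, (⟨ha, hb⟩ | ⟨ha, _⟩)⟩)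
        · exact Or.inl h
        · exact absurd ha hne12
        · exact Or.inr ha.symm
    · by_cases hw1 : w = p.1
      · subst hw1
        rw [PySem.Dict.getD_insert, if_neg hw2, PySem.Dict.getD_insert, if_pos rfl,
          pv_contains_add, Bool.or_eq_true, beq_iff_eq]
        constructor
        · rintro (h | h)
          · exact Or.inl h
          · exact Or.inr ⟨hlt, pv_mem_nodes h1, pv_mem_nodes h2, Or.inl ⟨rfl, h.symm⟩⟩
        · rintro (h | ⟨_, _, _, (⟨_, hb⟩ | ⟨ha, hb⟩)⟩)
          · exact Or.inl h
          · exact Or.inr hb.symm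
          · exact absurd hb.symm hw2
      · rw [PySem.Dict.getD_insert, if_neg hw2, PySem.Dict.getD_insert, if_neg hw1]
        constructor
        · exact fun h => Or.inl h
        · rintro (h | ⟨_, _, _, (⟨ha, _⟩ | ⟨_, hb⟩)⟩)
          · exact h
          · exact absurd ha.symm hw1
          · exact absurd hb.symm hw2
  · rw [if_neg hg]
    constructor
    · exact fun h => Or.inl h
    · rintro (h | ⟨hlt, h1, h2, _⟩)
      · exact h
      · exact absurd ⟨hlt, pv_contains_nodes h1, pv_contains_nodes h2⟩ hg

lemma pv_nb_fold_char (nodes : List String) (l : List (String × String)) :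
    ∀ (d : PySem.Dict String (PySem.Set String)) (w x : String),
      PySem.Set.contains ((l.foldl (pvNbStep nodes) d).getD w PySem.Set.empty) x = true ↔
        (PySem.Set.contains (d.getD w PySem.Set.empty) x = true ∨ ∃ p ∈ l, pvCnd nodes p w x) := by
  induction l with
  | nil => intro d w x; simp
  | cons p rest ih =>
    intro d w x
    rw [List.foldl_cons, ih (pvNbStep nodes d p) w x, pv_nb_step_char]
    constructor
    · rintro ((h | h) | ⟨q, hq, hc⟩)
      · exact Or.inl h
      · exact Or.inr ⟨p, by simp, h⟩
      · exact Or.inr ⟨q, by simp [hq], hc⟩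
    · rintro (h | ⟨q, hq, hc⟩)
      · exact Or.inl (Or.inl h)
      · rcases List.mem_cons.mp hq with rfl | hq2
        · exact Or.inl (Or.inr hc)
        · exact Or.inr ⟨q, hq2, hc⟩

lemma pv_nb_char (nodes : List String) (edge_set : List (String × String)) (w x : String) :
    PySem.Set.contains ((pvNbB nodes edge_set).getD w PySem.Set.empty) x = true ↔
      (w ≠ x ∧ w ∈ nodes ∧ x ∈ nodes ∧ pvEdgeA edge_set w x = true) := by
  rw [pvNbB_eq, pv_nb_fold_char]
  have hbase : PySem.Set.contains ((PySem.Dict.empty (κ := String) (ν := PySem.Set String)).getD w PySem.Set.empty) x = false := by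
    rw [PySem.Dict.getD_empty]; rfl
  rw [hbase]
  simp only [Bool.false_eq_true, false_or]
  constructor
  · rintro ⟨p, hp, hlt, h1, h2, (⟨ha, hb⟩ | ⟨ha, hb⟩)⟩
    · subst ha; subst hb
      refine ⟨pv_lt_ne hlt, h1, h2, ?_⟩
      unfold pvEdgeA pvPairA
      rw [if_neg (asymm hlt)]
      exact List.contains_iff_mem.mpr (by rwa [← Prod.mk.eta (p := p)] at hp)
    · subst ha; subst hb
      refine ⟨fun he => pv_lt_ne hlt he.symm, h2, h1, ?_⟩
      unfold pvEdgeA pvPairA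
      rw [if_pos hlt]
      exact List.contains_iff_mem.mpr (by rwa [← Prod.mk.eta (p := p)] at hp)
  · rintro ⟨hne, hw, hx, hedge⟩
    have hne' : w.toList ≠ x.toList := fun hh => hne (String.toList_inj.mp hh)
    unfold pvEdgeA pvPairA at hedge
    rcases lt_or_gt_of_ne hne' with h | h
    · rw [if_neg (asymm h)] at hedge
      exact ⟨(w, x), List.contains_iff_mem.mp hedge, h, hw, hx, Or.inl ⟨rfl, rfl⟩⟩
    · rw [if_pos h] at hedge
      exact ⟨(x, w), List.contains_iff_mem.mp hedge, h, hx, hw, Or.inr ⟨rfl, rfl⟩⟩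

lemma pv_nb_nodup (nodes : List String) (edge_set : List (String × String)) :
    ∀ w, ((pvNbB nodes edge_set).getD w PySem.Set.empty).Nodup := by
  rw [pvNbB_eq]
  suffices h : ∀ (l : List (String × String)) (d : PySem.Dict String (PySem.Set String)),
      (∀ w, (d.getD w PySem.Set.empty).Nodup) →
      ∀ w, ((l.foldl (pvNbStep nodes) d).getD w PySem.Set.empty).Nodup by
    apply h
    intro w
    rw [PySem.Dict.getD_empty]
    exact List.nodup_nil
  intro l
  induction l with
  | nil => intro d hd w; exact hd w
  | cons p rest ih =>
    intro d hd w
    rw [List.foldl_cons]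
    apply ih
    intro w2
    unfold pvNbStep
    by_cases hg : (p.1.toList < p.2.toList ∧ PySem.Set.contains (PySem.Set.ofList nodes) p.1 = true ∧ PySem.Set.contains (PySem.Set.ofList nodes) p.2 = true)
    · rw [if_pos hg]
      have hne12 : p.1 ≠ p.2 := pv_lt_ne hg.1
      by_cases hw2 : w2 = p.2
      · subst hw2
        rw [PySem.Dict.getD_insert, if_pos rfl, PySem.Dict.getD_insert,
          if_neg (fun h => hne12 h.symm)]
        exact PySem.Set.nodup_add _ _ (hd _)
      · by_cases hw1 : w2 = p.1
        · subst hw1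
          rw [PySem.Dict.getD_insert, if_neg hw2, PySem.Dict.getD_insert, if_pos rfl]
          exact PySem.Set.nodup_add _ _ (hd _)
        · rw [PySem.Dict.getD_insert, if_neg hw2, PySem.Dict.getD_insert, if_neg hw1]
          exact hd _
    · rw [if_neg hg]; exact hd _

-- the adjacency-building steps of pvAdjB, named
def pvInitStep (d : PySem.Dict String (List String)) (u : String) :
    PySem.Dict String (List String) := d.insert u []

def pvAdjStep (nodes : List String) (edge_set : List (String × String))
    (d : PySem.Dict String (List String)) (w : String) : PySem.Dict String (List String) :=
  (((pvNbB nodes edge_set).getD w PySem.Set.empty).foldl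
    (fun d2 x => d2.insert x (d2.getD x [] ++ [w])) d)

lemma pvAdjB_eq (nodes : List String) (edge_set : List (String × String)) :
    pvAdjB nodes edge_set =
      nodes.foldl (pvAdjStep nodes edge_set) (nodes.foldl pvInitStep PySem.Dict.empty) := rfl

lemma pv_adj_untouched (w : String) (L : List String) :
    ∀ (d : PySem.Dict String (List String)) (x : String), x ∉ L →
      ((L.foldl (fun d2 y => d2.insert y (d2.getD y [] ++ [w])) d).getD x []) = d.getD x [] := by
  induction L with
  | nil => intro d x _; rfl
  | cons a t ih =>
    intro d x hx
    rw [List.foldl_cons, ih _ x (fun h => hx (List.mem_cons_of_mem a h)),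
      PySem.Dict.getD_insert, if_neg (fun h => hx (by rw [h]; simp))]

lemma pv_adj_inner (w : String) (L : List String) (hL : L.Nodup) :
    ∀ (d : PySem.Dict String (List String)) (x : String),
      ((L.foldl (fun d2 y => d2.insert y (d2.getD y [] ++ [w])) d).getD x []) =
        d.getD x [] ++ (if x ∈ L then [w] else []) := by
  induction L with
  | nil => intro d x; simp
  | cons a t ih =>
    intro d x
    rw [List.foldl_cons]
    by_cases hxa : x = a
    · subst hxa
      have hnt : x ∉ t := (List.nodup_cons.mp hL).1
      rw [pv_adj_untouched w t _ x hnt, PySem.Dict.getD_insert, if_pos rfl]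
      simp
    · rw [ih (List.nodup_cons.mp hL).2 _ x, PySem.Dict.getD_insert, if_neg hxa]
      simp [List.mem_cons, hxa]

lemma pv_adj_fold_char (nodes : List String) (edge_set : List (String × String))
    (l : List String) :
    ∀ (d : PySem.Dict String (List String)) (acc : String → List String),
      (∀ x, d.getD x [] = acc x) →
      ∀ x, ((l.foldl (pvAdjStep nodes edge_set) d).getD x []) =
        acc x ++ l.filter (fun w => PySem.Set.contains ((pvNbB nodes edge_set).getD w PySem.Set.empty) x) := by
  induction l with
  | nil => intro d acc hd x; simp [hd x]
  | cons w rest ih =>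
    intro d acc hd x
    rw [List.foldl_cons]
    have hstep : ∀ x, (pvAdjStep nodes edge_set d w).getD x [] =
        acc x ++ (if PySem.Set.contains ((pvNbB nodes edge_set).getD w PySem.Set.empty) x = true then [w] else []) := by
      intro x2
      unfold pvAdjStep
      rw [pv_adj_inner w _ (pv_nb_nodup nodes edge_set w) d x2, hd x2]
      congr 1
      by_cases hm : x2 ∈ (pvNbB nodes edge_set).getD w PySem.Set.empty
      · rw [if_pos hm, if_pos (by rwa [PySem.Set.contains_iff])]
      · rw [if_neg hm, if_neg (fun hcc => hm (pv_mem_of_contains hcc))]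
    rw [ih (pvAdjStep nodes edge_set d w) _ hstep x, List.filter_cons]
    by_cases hc : PySem.Set.contains ((pvNbB nodes edge_set).getD w PySem.Set.empty) x = true
    · rw [if_pos hc, if_pos (by rw [hc])]
      simp
    · rw [if_neg hc, if_neg (by rw [pv_eq_false hc]; simp)]
      simp

lemma pv_adj_init (l : List String) :
    ∀ (d : PySem.Dict String (List String)), (∀ x, d.getD x [] = []) →
      ∀ x, ((l.foldl pvInitStep d).getD x []) = [] := by
  induction l with
  | nil => intro d hd x; exact hd x
  | cons a t ih =>
    intro d hd x
    rw [List.foldl_cons]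
    apply ih
    intro x2
    unfold pvInitStep
    rw [PySem.Dict.getD_insert]
    split
    · rfl
    · exact hd x2

lemma pv_adjB_char (nodes : List String) (edge_set : List (String × String)) (x : String) :
    (pvAdjB nodes edge_set).getD x [] =
      nodes.filter (fun w => PySem.Set.contains ((pvNbB nodes edge_set).getD w PySem.Set.empty) x) := by
  rw [pvAdjB_eq, pv_adj_fold_char nodes edge_set nodes _ (fun _ => [])
    (pv_adj_init nodes PySem.Dict.empty (fun x2 => by rw [PySem.Dict.getD_empty])) x]
  rw [List.nil_append]

lemma pv_adj_sub (nodes : List String) (edge_set : List (String × String)) (x y : String)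
    (hy : y ∈ (pvAdjB nodes edge_set).getD x []) : y ∈ nodes := by
  rw [pv_adjB_char] at hy
  exact (List.mem_filter.mp hy).1

lemma pv_filter_pair {α : Type} (l : List α) (P Q R : α → Bool)
    (h : ∀ a ∈ l, P a = (Q a && R a)) : l.filter P = (l.filter Q).filter R := by
  induction l with
  | nil => rfl
  | cons a t ih =>
    have ht := ih (fun b hb => h b (by simp [hb]))
    by_cases hQ : Q a = true
    · by_cases hR : R a = true
      · rw [List.filter_cons, if_pos (by rw [h a (by simp), hQ, hR]; rfl),
          List.filter_cons, if_pos hQ, List.filter_cons, if_pos hR, ht]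
      · have hR' : R a = false := pv_eq_false hR
        rw [List.filter_cons, if_neg (by rw [h a (by simp), hQ, hR']; simp),
          List.filter_cons, if_pos hQ, List.filter_cons, if_neg (by rw [hR']; simp), ht]
    · have hQ' : Q a = false := pv_eq_false hQ
      rw [List.filter_cons, if_neg (by rw [h a (by simp), hQ']; simp),
        List.filter_cons, if_neg (by rw [hQ']; simp), ht]

lemma pv_adj_eq (nodes : List String) (edge_set : List (String × String)) (x : String)
    (hx : x ∈ nodes) :
    (pvAdjB nodes edge_set).getD x [] =
      (pvNeighA nodes edge_set x).filter (fun w => !(w == x)) := by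
  rw [pv_adjB_char, pvNeighA]
  apply pv_filter_pair
  intro w hw
  rcases hc : PySem.Set.contains ((pvNbB nodes edge_set).getD w PySem.Set.empty) x with _ | _
  · rcases hq : pvEdgeA edge_set x w with _ | _
    · rfl
    · rcases hr : (w == x) with _ | _
      · exfalso
        have hne : w ≠ x := by
          intro h; rw [h] at hr; simp at hr
        have : PySem.Set.contains ((pvNbB nodes edge_set).getD w PySem.Set.empty) x = true :=
          (pv_nb_char nodes edge_set w x).mpr ⟨hne, hw, hx, by rw [pv_edge_comm]; exact hq⟩
        rw [hc] at this
        exact Bool.noConfusion this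
      · rfl
  · obtain ⟨hne, _, _, hedge⟩ := (pv_nb_char nodes edge_set w x).mp hc
    have hq : pvEdgeA edge_set x w = true := by rw [pv_edge_comm]; exact hedge
    have hr : (w == x) = false := by simp [hne]
    rw [hq, hr]; rfl

-- ——— the reference stack DFS equals B's stack DFS over the prebuilt adjacency ———

lemma pv_main (nodes : List String) (edge_set : List (String × String)) :
    ∀ (k n : Nat) (c : List String) (v : PySem.Set String) (s1 s2 : List String),
      (nodes.filter (fun w => !PySem.Set.contains v w)).length ≤ k →
      s1.length + s2.length ≤ n →
      (∀ y ∈ s1, y ∈ nodes) → (∀ y ∈ s2, y ∈ nodes) →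
      s1.filter (fun y => !PySem.Set.contains v y) = s2.filter (fun y => !PySem.Set.contains v y) →
      pvRefVisit nodes edge_set c v s1 = pvVisitB (pvAdjB nodes edge_set) c v s2 := by
  intro k
  induction k with
  | zero =>
    intro n c v s1 s2 hk _ hs1 hs2 _
    have hall : ∀ y, y ∈ nodes → PySem.Set.contains v y = true := by
      intro y hy
      rcases h : PySem.Set.contains v y with _ | _
      · exfalso
        have hmem : y ∈ nodes.filter (fun w => !PySem.Set.contains v w) :=
          List.mem_filter.mpr ⟨hy, by rw [h]; rfl⟩
        have := List.length_pos_of_mem hmem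
        omega
      · rfl
    rw [pv_ref_skip _ _ _ _ _ (fun y hy => hall y (hs1 y hy)),
        pv_visitB_skip _ _ _ _ (fun y hy => hall y (hs2 y hy))]
  | succ k ihk =>
    intro n
    induction n with
    | zero =>
      intro c v s1 s2 _ hn hs1 hs2 _
      cases s1 with
      | cons a t => simp only [List.length_cons] at hn; omega
      | nil =>
        cases s2 with
        | cons a t => simp only [List.length_cons] at hn; omega
        | nil => rw [pvRefVisit, pvVisitB]
    | succ n ihn =>
      intro c v s1 s2 hk hn hs1 hs2 hf
      cases s1 with
      | nil =>
        have hv2 : ∀ y ∈ s2, PySem.Set.contains v y = true := by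
          intro y hy
          rcases h : PySem.Set.contains v y with _ | _
          · exfalso
            have hmem : y ∈ s2.filter (fun y => !PySem.Set.contains v y) :=
              List.mem_filter.mpr ⟨hy, by rw [h]; rfl⟩
            rw [← hf] at hmem
            simp at hmem
          · rfl
        rw [pvRefVisit, pv_visitB_skip _ _ _ _ hv2]
      | cons x r1 =>
        by_cases hvx : PySem.Set.contains v x = true
        · rw [pvRefVisit, if_pos hvx]
          apply ihn c v r1 s2 hk (by simp only [List.length_cons] at hn; omega)
            (fun y hy => hs1 y (by simp [hy])) hs2
          rwa [List.filter_cons, if_neg (by rw [hvx]; simp)] at hf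
        · have hvx' : PySem.Set.contains v x = false := pv_eq_false hvx
          have hPx : (!PySem.Set.contains v x) = true := by rw [hvx']; rfl
          cases s2 with
          | nil =>
            exfalso
            have hmem : x ∈ (x :: r1).filter (fun y => !PySem.Set.contains v y) :=
              List.mem_filter.mpr ⟨by simp, hPx⟩
            rw [hf] at hmem
            simp at hmem
          | cons y r2 =>
            by_cases hvy : PySem.Set.contains v y = true
            · rw [List.filter_cons, List.filter_cons, if_pos hPx,
                if_neg (by rw [hvy]; simp)] at hf
              rw [pvVisitB, if_pos hvy]
              apply ihn c v (x :: r1) r2 hk (by simp only [List.length_cons] at hn ⊢; omega)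
                hs1 (fun z hz => hs2 z (by simp [hz]))
              rw [List.filter_cons, if_pos hPx]
              exact hf
            · have hvy' : PySem.Set.contains v y = false := pv_eq_false hvy
              have hPy : (!PySem.Set.contains v y) = true := by rw [hvy']; rfl
              rw [List.filter_cons, if_pos hPx, List.filter_cons, if_pos hPy] at hf
              have hxy : x = y := by injection hf with h1 _
              subst hxy
              have hf' : r1.filter (fun y => !PySem.Set.contains v y) =
                  r2.filter (fun y => !PySem.Set.contains v y) := by injection hf
              have hxn : x ∈ nodes := hs1 x (by simp)
              rw [pvRefVisit, if_neg (by rw [hvx']; simp), if_pos hxn,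
                pvVisitB, if_neg (by rw [hvx']; simp)]
              have hstrict : ((nodes.filter (fun w => !PySem.Set.contains (PySem.Set.add v x) w)).length) < ((nodes.filter (fun w => !PySem.Set.contains v w)).length) := by
                exact pv_filter_length_strict nodes _ _ (pv_sub_add v x) x hxn hPx
                  (by show (!PySem.Set.contains (PySem.Set.add v x) x) = false
                      rw [pv_contains_add]; simp)
              apply ihk ((pvNeighA nodes edge_set x ++ r1).length + ((pvAdjB nodes edge_set).getD x [] ++ r2).length)
                (c ++ [x]) (PySem.Set.add v x) _ _ (by omega) (le_refl _)
              · intro z hz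
                rcases List.mem_append.mp hz with hz | hz
                · exact (List.mem_filter.mp hz).1
                · exact hs1 z (by simp [hz])
              · intro z hz
                rcases List.mem_append.mp hz with hz | hz
                · exact pv_adj_sub nodes edge_set x z hz
                · exact hs2 z (by simp [hz])
              · rw [List.filter_append, List.filter_append]
                have hpoint1 : ∀ a ∈ pvNeighA nodes edge_set x,
                    (!PySem.Set.contains (PySem.Set.add v x) a) =
                      ((!(a == x)) && !PySem.Set.contains (PySem.Set.add v x) a) := by
                  intro a _
                  by_cases hax : a = x
                  · subst hax
                    rw [pv_contains_add]
                    simp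
                  · have : (a == x) = false := by simp [hax]
                    rw [this]
                    simp
                have hpart1 : (pvNeighA nodes edge_set x).filter (fun w => !PySem.Set.contains (PySem.Set.add v x) w) =
                    ((pvAdjB nodes edge_set).getD x []).filter (fun w => !PySem.Set.contains (PySem.Set.add v x) w) := by
                  rw [pv_adj_eq nodes edge_set x hxn]
                  exact pv_filter_pair _ _ _ _ hpoint1
                have hsplit : ∀ r : List String,
                    r.filter (fun y => !PySem.Set.contains (PySem.Set.add v x) y) =
                      (r.filter (fun y => !PySem.Set.contains v y)).filter (fun y => !(y == x)) := by
                  intro r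
                  apply pv_filter_pair
                  intro a _
                  rw [pv_contains_add, Bool.not_or]
                have hpart2 : r1.filter (fun y => !PySem.Set.contains (PySem.Set.add v x) y) =
                    r2.filter (fun y => !PySem.Set.contains (PySem.Set.add v x) y) := by
                  rw [hsplit r1, hsplit r2, hf']
                rw [hpart1, hpart2]

-- ——— the outer loops agree step by step ———

lemma pv_outer (nodes : List String) (edge_set : List (String × String)) :
    ∀ (l : List String), (∀ y ∈ l, y ∈ nodes) →
    ∀ (st : PySem.Set String × List (List String)),
      l.foldl
        (fun (st : PySem.Set String × List (List String)) node =>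
          if ¬ PySem.Set.contains st.1 node then
            ((pvDfsA nodes edge_set (nodes.length + 1) node [] st.1).2,
              st.2 ++ [(pvDfsA nodes edge_set (nodes.length + 1) node [] st.1).1])
          else st) st =
      l.foldl
        (fun (st : PySem.Set String × List (List String)) root =>
          if PySem.Set.contains st.1 root then st
          else
            ((pvVisitB (pvAdjB nodes edge_set) [] st.1 [root]).2,
              st.2 ++ [(pvVisitB (pvAdjB nodes edge_set) [] st.1 [root]).1])) st := by
  intro l
  induction l with
  | nil => intro _ st; rfl
  | cons u rest ih =>
    intro hl st
    rw [List.foldl_cons, List.foldl_cons]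
    have hu : u ∈ nodes := hl u (by simp)
    have hstep :
        (if ¬ PySem.Set.contains st.1 u then
          ((pvDfsA nodes edge_set (nodes.length + 1) u [] st.1).2,
            st.2 ++ [(pvDfsA nodes edge_set (nodes.length + 1) u [] st.1).1])
        else st) =
        (if PySem.Set.contains st.1 u then st
        else
          ((pvVisitB (pvAdjB nodes edge_set) [] st.1 [u]).2,
            st.2 ++ [(pvVisitB (pvAdjB nodes edge_set) [] st.1 [u]).1])) := by
      by_cases hv : PySem.Set.contains st.1 u = true
      · rw [if_neg (fun hC => hC hv), if_pos hv]
      · have hv' : PySem.Set.contains st.1 u = false := pv_eq_false hv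
        rw [if_pos (by rw [hv']; simp), if_neg (by rw [hv']; simp)]
        have h1 : pvDfsA nodes edge_set (nodes.length + 1) u [] st.1 =
            pvRefVisit nodes edge_set [] st.1 [u] :=
          pv_dfs_ref nodes edge_set (nodes.length + 1) u [] st.1 hu hv'
            (by have := List.length_filter_le (fun w => !PySem.Set.contains st.1 w) nodes; omega)
            (by intro y hy; cases hy)
        have h2 : pvRefVisit nodes edge_set [] st.1 [u] =
            pvVisitB (pvAdjB nodes edge_set) [] st.1 [u] :=
          pv_main nodes edge_set ((nodes.filter (fun w => !PySem.Set.contains st.1 w)).length) 2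
            [] st.1 [u] [u] (le_refl _) (by simp)
            (by intro y hy; rw [List.mem_singleton.mp hy]; exact hu)
            (by intro y hy; rw [List.mem_singleton.mp hy]; exact hu)
            rfl
        rw [h1, h2]
    rw [hstep]
    exact ih (fun y hy => hl y (by simp [hy])) _

-- ===== VERDICT (by name: the statement is the Claim_ definition above) =====
theorem components_of_spec : Claim_equal_components_of := by
  intro nodes edge_set _
  show components_of nodes edge_set = components_of_alt nodes edge_set
  exact congrArg Prod.snd
    (pv_outer nodes edge_set nodes (fun y hy => hy) (PySem.Set.empty, []))
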